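-- pv_equiv track=rewrite | github.com/EunSeo119/Algorithm-Study | Programmers/모의고사.py | solution
-- ===== SOURCE A (Python) =====
-- def solution(answers):
--     math1=[1,2,3,4,5]
--     math2=[2,1,2,3,2,4,2,5]
--     math3=[3,3,1,1,2,2,4,4,5,5]
--     result_arr=[]
--     result1=0
--     result2=0
--     result3=0
--     lens=len(answers)
--     save=lens//5+1
--     math1=math1*save
--     math2=math2*save
--     math3=math3*save
--     for i in answers:
--         if i==math1.pop(0):
--             result1+=1
--         if i==math2.pop(0):
--             result2+=1
--         if i==math3.pop(0):
--             result3+=1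
--
--     max_result=max(result1,result2,result3)
--     if result1==max_result:
--         result_arr.append(1)
--     if result2==max_result:
--         result_arr.append(2)
--     if result3==max_result:
--         result_arr.append(3)
--     return result_arr
-- ===== SOURCE B (Python) =====
-- def solution(answers):
--     patterns = [[1, 2, 3, 4, 5],
--                 [2, 1, 2, 3, 2, 4, 2, 5],
--                 [3, 3, 1, 1, 2, 2, 4, 4, 5, 5]]
--     scores = [sum(1 for i, a in enumerate(answers) if a == p[i % len(p)])
--               for p in patterns]
--     best = max(scores)
--     return [k + 1 for k, s in enumerate(scores) if s == best]
-- ===== Notes on version B (the rewrite author's own statement) =====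
-- stated objective: faster
-- what changed: B indexes each fixed pattern at position i modulo its length in a single enumerate pass instead of materialising replicated pattern lists and consuming them with quadratic pop(0) calls.
import Mathlib
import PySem

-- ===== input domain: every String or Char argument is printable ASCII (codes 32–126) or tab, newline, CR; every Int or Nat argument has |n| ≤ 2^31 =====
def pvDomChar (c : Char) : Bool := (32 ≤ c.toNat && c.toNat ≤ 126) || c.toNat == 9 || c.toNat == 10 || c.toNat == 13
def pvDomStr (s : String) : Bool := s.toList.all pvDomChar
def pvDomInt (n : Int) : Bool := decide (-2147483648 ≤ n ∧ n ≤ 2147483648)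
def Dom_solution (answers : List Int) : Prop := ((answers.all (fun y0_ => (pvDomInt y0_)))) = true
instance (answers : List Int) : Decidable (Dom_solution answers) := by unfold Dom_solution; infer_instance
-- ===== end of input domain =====

-- B replaces A's quadratic pop(0) consumption of replicated pattern lists by
-- indexing each pattern at position i modulo its length, in one pass (faster: asymptotic).

-- ===== PORT A =====
-- the loop body: pop(0) returns the head and leaves the tail; the replicated
-- lists are always long enough, so the popped list is never empty (headD's
-- default 0 is unreachable on every input)
def solutionStep (st : List Int × List Int × List Int × Int × Int × Int) (i : Int) :
    List Int × List Int × List Int × Int × Int × Int :=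
  match st with
  | (m1, m2, m3, r1, r2, r3) =>
    (m1.tail, m2.tail, m3.tail,
     (if i = m1.headD 0 then r1 + 1 else r1),
     (if i = m2.headD 0 then r2 + 1 else r2),
     (if i = m3.headD 0 then r3 + 1 else r3))

def solution (answers : List Int) : List Int :=
  let math1 : List Int := [1, 2, 3, 4, 5]
  let math2 : List Int := [2, 1, 2, 3, 2, 4, 2, 5]
  let math3 : List Int := [3, 3, 1, 1, 2, 2, 4, 4, 5, 5]
  let lens := answers.length
  let save := lens / 5 + 1            -- len(answers)//5 + 1 on a nonnegative length: Nat division is exact here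
  let m1 := (List.replicate save math1).flatten    -- math1 * save
  let m2 := (List.replicate save math2).flatten
  let m3 := (List.replicate save math3).flatten
  match answers.foldl solutionStep (m1, m2, m3, 0, 0, 0) with
  | (_, _, _, result1, result2, result3) =>
    let max_result := max result1 (max result2 result3)   -- max(r1, r2, r3)
    let arr : List Int := []
    let arr := if result1 = max_result then arr ++ [1] else arr
    let arr := if result2 = max_result then arr ++ [2] else arr
    let arr := if result3 = max_result then arr ++ [3] else arr
    arr

-- ===== PORT B =====
-- sum(1 for i, a in enumerate(answers) if a == p[i % len(p)]): enumerate is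
-- ported as a fold carrying the running index; p[i % len(p)] is always in
-- range, so getD's default 0 is unreachable
def solutionAltScore (p : List Int) (answers : List Int) : Int :=
  (answers.foldl
    (fun (si : Int × Nat) a =>
      ((if a = p.getD (si.2 % p.length) 0 then si.1 + 1 else si.1), si.2 + 1))
    (0, 0)).1

def solution_alt (answers : List Int) : List Int :=
  let patterns : List (List Int) :=
    [[1, 2, 3, 4, 5], [2, 1, 2, 3, 2, 4, 2, 5], [3, 3, 1, 1, 2, 2, 4, 4, 5, 5]]
  let scores := patterns.map (fun p => solutionAltScore p answers)
  let best := PySem.List.maxD scores id 0      -- max(scores); scores is nonempty, default unreachable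
  -- [k + 1 for k, s in enumerate(scores) if s == best]
  (scores.foldl
    (fun (ak : List Int × Nat) s =>
      ((if s = best then ak.1 ++ [(ak.2 : Int) + 1] else ak.1), ak.2 + 1))
    ([], 0)).1

-- ===== PRECONDITION & SPEC =====
def Spec_solution (answers : List Int) (out : List Int) : Prop := out = solution_alt answers
instance (answers : List Int) (out : List Int) : Decidable (Spec_solution answers out) := by unfold Spec_solution; infer_instance

-- ===== CLAIM (what is proved, stated in full; the proofs are below) =====
def Claim_equal_solution : Prop := ∀ (answers : List Int), Dom_solution answers → Spec_solution answers (solution answers)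

-- ===== LEMMAS AND PROOFS =====

-- match count of A's consuming loop against a list L (head/tail consumption)
def cnt : List Int → List Int → Int
  | [], _ => 0
  | a :: rest, L => (if a = L.headD 0 then 1 else 0) + cnt rest L.tail

-- match count of B's loop against pattern p starting at index k
def cntMod : List Int → List Int → Nat → Int
  | [], _, _ => 0
  | a :: rest, p, k => (if a = p.getD (k % p.length) 0 then 1 else 0) + cntMod rest p (k + 1)

theorem foldA_cnt (ans : List Int) : ∀ (m1 m2 m3 : List Int) (r1 r2 r3 : Int),
    ∃ u v w, ans.foldl solutionStep (m1, m2, m3, r1, r2, r3)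
      = (u, v, w, r1 + cnt ans m1, r2 + cnt ans m2, r3 + cnt ans m3) := by
  induction ans with
  | nil => intro m1 m2 m3 r1 r2 r3; exact ⟨m1, m2, m3, by simp [cnt]⟩
  | cons a rest ih =>
    intro m1 m2 m3 r1 r2 r3
    obtain ⟨u, v, w, h⟩ := ih m1.tail m2.tail m3.tail
      (if a = m1.headD 0 then r1 + 1 else r1)
      (if a = m2.headD 0 then r2 + 1 else r2)
      (if a = m3.headD 0 then r3 + 1 else r3)
    refine ⟨u, v, w, ?_⟩
    simp only [List.foldl_cons, solutionStep, h, cnt]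
    split_ifs <;> simp <;> omega

theorem foldB_score (p : List Int) (ans : List Int) : ∀ (s : Int) (k : Nat),
    (ans.foldl
      (fun (si : Int × Nat) a =>
        ((if a = p.getD (si.2 % p.length) 0 then si.1 + 1 else si.1), si.2 + 1))
      (s, k)).1 = s + cntMod ans p k := by
  induction ans with
  | nil => intro s k; simp [cntMod]
  | cons a rest ih =>
    intro s k
    simp only [List.foldl_cons, cntMod, ih]
    split_ifs <;> omega

theorem getD_flatten_replicate (p : List Int) :
    ∀ (m j : Nat), j < p.length * m →
      ((List.replicate m p).flatten).getD j 0 = p.getD (j % p.length) 0 := by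
  intro m
  induction m with
  | zero => intro j hj; omega
  | succ n ih =>
    intro j hj
    rw [List.replicate_succ, List.flatten_cons]
    by_cases hlt : j < p.length
    · rw [Nat.mod_eq_of_lt hlt]
      simp [List.getD, List.getElem?_append_left hlt]
    · have hj' : j = p.length + (j - p.length) := by omega
      rw [hj']
      have hms : p.length * (n + 1) = p.length * n + p.length := Nat.mul_succ _ _
      have := ih (j - p.length) (by omega)
      simp only [List.getD] at this ⊢
      rw [List.getElem?_append_right (by omega), Nat.add_sub_cancel_left,
        Nat.add_mod_left, this]

theorem cnt_eq_cntMod (p : List Int) :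
    ∀ (ans : List Int) (m k : Nat), k + ans.length ≤ p.length * m →
      cnt ans (((List.replicate m p).flatten).drop k) = cntMod ans p k := by
  intro ans
  induction ans with
  | nil => intro m k _; simp [cnt, cntMod]
  | cons a rest ih =>
    intro m k hk
    rw [List.length_cons] at hk
    have hkm : k < p.length * m := by omega
    have hhead : (((List.replicate m p).flatten).drop k).headD 0
        = p.getD (k % p.length) 0 := by
      rw [List.headD_eq_head?_getD, List.head?_drop, ← List.getD_eq_getElem?_getD,
        getD_flatten_replicate p m k hkm]
    simp only [cnt, cntMod, List.tail_drop, hhead]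
    rw [ih m (k + 1) (by omega)]

theorem maxD3 (a b c : Int) : PySem.List.maxD [a, b, c] id 0 = max a (max b c) := by
  unfold PySem.List.maxD PySem.List.max?
  simp only [List.foldl_cons, List.foldl_nil, id_eq]
  repeat' split
  all_goals split_ifs at * <;> simp_all <;> omega

-- ===== VERDICT (by name: the statement is the Claim_ definition above) =====
theorem solution_spec : Claim_equal_solution := by
  intro answers _
  unfold Spec_solution solution solution_alt solutionAltScore
  simp only []
  obtain ⟨u, v, w, hA⟩ := foldA_cnt answers
    ((List.replicate (answers.length / 5 + 1) ([1, 2, 3, 4, 5] : List Int)).flatten)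
    ((List.replicate (answers.length / 5 + 1) ([2, 1, 2, 3, 2, 4, 2, 5] : List Int)).flatten)
    ((List.replicate (answers.length / 5 + 1) ([3, 3, 1, 1, 2, 2, 4, 4, 5, 5] : List Int)).flatten)
    0 0 0
  rw [hA]
  have h1 := cnt_eq_cntMod [1, 2, 3, 4, 5] answers
    (answers.length / 5 + 1) 0 (by simp; omega)
  have h2 := cnt_eq_cntMod [2, 1, 2, 3, 2, 4, 2, 5] answers
    (answers.length / 5 + 1) 0 (by simp; omega)
  have h3 := cnt_eq_cntMod [3, 3, 1, 1, 2, 2, 4, 4, 5, 5] answers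
    (answers.length / 5 + 1) 0 (by simp; omega)
  simp only [List.drop_zero] at h1 h2 h3
  simp only [List.map_cons, List.map_nil, foldB_score, zero_add, h1, h2, h3,
    maxD3, List.foldl_cons, List.foldl_nil]
  generalize cntMod answers [1, 2, 3, 4, 5] 0 = c1
  generalize cntMod answers [2, 1, 2, 3, 2, 4, 2, 5] 0 = c2
  generalize cntMod answers [3, 3, 1, 1, 2, 2, 4, 4, 5, 5] 0 = c3
  split_ifs <;> simp
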